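-- pv_equiv track=rewrite | github.com/apple1417/willow2-sdk-mods | text_mod_loader/loader.py | join_lines_markdown_like
-- ===== SOURCE A (Python) =====
-- from collections.abc import Iterable, Sequence
--
-- def join_lines_markdown_like(lines: Iterable[str]) -> str:
--     """
--     Joins a list of lines similarly to how markdown does it.
--
--     Adjacent lines get space seperated, you need an entirely empty line to add a newline.
--
--     Args:
--         lines: The lines to join.
--     Returns:
--         The lines joined into a single string.
--     """
--
--     def _markdown_iterator() -> Iterable[str]:
--         no_space = True
--         for line in lines:
--             stripped = line.strip()
--             if stripped:
--                 if not no_space: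
--                     yield " "
--                 yield stripped
--                 no_space = False
--             else:
--                 if not no_space:
--                     yield "\n"
--                 no_space = True
--
--     return "".join(_markdown_iterator())
-- ===== SOURCE B (Python) =====
-- def join_lines_markdown_like(lines):
--     """Join lines markdown-style: adjacent non-blank lines are space-separated
--     paragraphs; blank lines separate paragraphs with a single newline."""
--     paragraphs = []
--     current = []
--     for line in lines:
--         s = line.strip()
--         if s:
--             current.append(s)
--         elif current:
--             paragraphs.append(" ".join(current))
--             current = []
--     if current:
--         paragraphs.append(" ".join(current))
--         return "\n".join(paragraphs)
--     elif paragraphs: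
--         return "\n".join(paragraphs) + "\n"
--     else:
--         return ""
-- ===== Notes on version B (the rewrite author's own statement) =====
-- stated objective: simpler
-- what changed: Replaces the streaming generator with a carried no_space flag by a two-level decomposition: collect each paragraph's stripped lines, join each paragraph with ' ', join the paragraphs with '\n', and append the trailing '\n' only when the input ends in a blank run after content.
import Mathlib
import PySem

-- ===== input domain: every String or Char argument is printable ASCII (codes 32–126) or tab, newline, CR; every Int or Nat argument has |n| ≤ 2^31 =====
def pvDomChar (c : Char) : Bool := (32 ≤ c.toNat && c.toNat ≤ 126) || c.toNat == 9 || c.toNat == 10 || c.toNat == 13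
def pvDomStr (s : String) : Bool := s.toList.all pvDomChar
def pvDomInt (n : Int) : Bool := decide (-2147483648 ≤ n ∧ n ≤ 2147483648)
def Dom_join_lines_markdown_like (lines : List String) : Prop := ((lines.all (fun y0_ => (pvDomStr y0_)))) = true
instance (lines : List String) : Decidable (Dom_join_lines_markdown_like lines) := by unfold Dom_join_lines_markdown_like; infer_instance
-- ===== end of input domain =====

-- B replaces A's streaming generator (with its carried no_space flag) by a two-level
-- decomposition: collect paragraphs of stripped lines, join each with " ", join the
-- paragraphs with "\n" (plus one trailing "\n" after a final blank run); objective: simpler.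


-- ===== PORT A =====
-- A: one pass, yielding " "/stripped/"\n" pieces while carrying the no_space flag;
-- the generator + "".join is ported as a foldl accumulating the joined string.
def join_lines_markdown_like (lines : List String) : String :=
  (lines.foldl
    (fun (st : String × Bool) (line : String) =>
      let stripped := PySem.Str.strip line
      if stripped ≠ "" then
        (st.1 ++ (if !st.2 then " " else "") ++ stripped, false)
      else
        (st.1 ++ (if !st.2 then "\n" else ""), true))
    ("", true)).1

-- ===== PORT B =====
def join_lines_markdown_like_alt (lines : List String) : String :=
  let st := (lines.map PySem.Str.strip).foldl
    (fun (st : List String × List String) (s : String) =>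
      if s ≠ "" then (st.1, st.2 ++ [s])
      else if st.2 ≠ [] then (st.1 ++ [PySem.Str.join " " st.2], [])
      else st)
    ([], [])
  if st.2 ≠ [] then PySem.Str.join "\n" (st.1 ++ [PySem.Str.join " " st.2])
  else if st.1 ≠ [] then PySem.Str.join "\n" st.1 ++ "\n"
  else ""

-- ===== PRECONDITION & SPEC =====
def Spec_join_lines_markdown_like (lines : List String) (out : String) : Prop := out = join_lines_markdown_like_alt lines
instance (lines : List String) (out : String) : Decidable (Spec_join_lines_markdown_like lines out) := by unfold Spec_join_lines_markdown_like; infer_instance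

-- ===== CLAIM (what is proved, stated in full; the proofs are below) =====
def Claim_equal_join_lines_markdown_like : Prop := ∀ (lines : List String), Dom_join_lines_markdown_like lines → Spec_join_lines_markdown_like lines (join_lines_markdown_like lines)

-- ===== LEMMAS AND PROOFS =====

theorem chars_join_append_singleton (sep : List Char) (P : List (List Char)) (x : List Char)
    (h : P ≠ []) :
    PySem.Chars.join sep (P ++ [x]) = PySem.Chars.join sep P ++ sep ++ x := by
  induction P with
  | nil => exact absurd rfl h
  | cons a P ih =>
    cases P with
    | nil => simp [PySem.Chars.join_cons_cons, PySem.Chars.join_singleton]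
    | cons b Q =>
      have := ih (by simp)
      simp only [List.cons_append] at this ⊢
      rw [PySem.Chars.join_cons_cons, PySem.Chars.join_cons_cons, this]
      simp [List.append_assoc]

theorem str_join_append_singleton (sep : String) (P : List String) (x : String)
    (h : P ≠ []) :
    PySem.Str.join sep (P ++ [x]) = PySem.Str.join sep P ++ sep ++ x := by
  apply String.toList_inj.mp
  simp only [PySem.Str.toList_join, List.map_append, List.map_cons, List.map_nil,
    String.toList_append]
  rw [chars_join_append_singleton sep.toList (P.map String.toList) x.toList (by simpa using h)]

theorem str_join_singleton (sep : String) (x : String) :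
    PySem.Str.join sep [x] = x := by
  apply String.toList_inj.mp
  simp [PySem.Str.toList_join, PySem.Chars.join_singleton]

-- B's finalization of a fold state, as a standalone function of the state.
def renderJ (P c : List String) : String :=
  if c ≠ [] then PySem.Str.join "\n" (P ++ [PySem.Str.join " " c])
  else if P ≠ [] then PySem.Str.join "\n" P ++ "\n"
  else ""

-- Appending one more stripped word to the open paragraph.
theorem renderJ_snoc_word (P c : List String) (s : String) :
    renderJ P (c ++ [s]) = renderJ P c ++ (if c = [] then "" else " ") ++ s := by
  by_cases hc : c = []
  · subst hc
    by_cases hP : P = []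
    · subst hP; simp [renderJ, str_join_singleton]
    · simp [renderJ, hP, str_join_singleton, str_join_append_singleton "\n" P s hP]
  · simp only [renderJ, if_pos (by simp [hc] : c ++ [s] ≠ []), if_pos (by simpa using hc),
      if_neg hc]
    rw [str_join_append_singleton " " c s hc]
    by_cases hP : P = []
    · subst hP; simp [str_join_singleton, String.append_assoc]
    · rw [str_join_append_singleton "\n" P _ hP, str_join_append_singleton "\n" P _ hP]
      simp [String.append_assoc]

-- Closing the open paragraph on a blank line.
theorem renderJ_close (P c : List String) (hc : c ≠ []) :
    renderJ (P ++ [PySem.Str.join " " c]) [] = renderJ P c ++ "\n" := by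
  simp [renderJ, hc]

-- The fold invariant: A's accumulated string is B's finalization of B's state,
-- and A's no_space flag is `current = []`.
theorem main_invariant (l : List String) :
    ∀ (acc : String) (P c : List String), acc = renderJ P c →
    (l.foldl
      (fun (st : String × Bool) (line : String) =>
        let stripped := PySem.Str.strip line
        if stripped ≠ "" then
          (st.1 ++ (if !st.2 then " " else "") ++ stripped, false)
        else
          (st.1 ++ (if !st.2 then "\n" else ""), true))
      (acc, decide (c = []))).1
    = (let st := (l.map PySem.Str.strip).foldl
        (fun (st : List String × List String) (s : String) =>
          if s ≠ "" then (st.1, st.2 ++ [s])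
          else if st.2 ≠ [] then (st.1 ++ [PySem.Str.join " " st.2], [])
          else st)
        (P, c);
       renderJ st.1 st.2) := by
  induction l with
  | nil => intro acc P c hinv; simpa using hinv
  | cons line l ih =>
    intro acc P c hinv
    simp only [List.foldl_cons, List.map_cons]
    by_cases hne : PySem.Str.strip line = ""
    · -- blank line
      by_cases hc : c = []
      · subst hc
        simpa [hne] using ih acc P [] hinv
      · have hacc : acc ++ "\n" = renderJ (P ++ [PySem.Str.join " " c]) [] := by
          rw [renderJ_close P c hc, hinv]
        simpa [hne, hc] using ih (acc ++ "\n") (P ++ [PySem.Str.join " " c]) [] hacc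
    · -- non-blank line
      have hacc : acc ++ (if !decide (c = []) then " " else "") ++ PySem.Str.strip line
          = renderJ P (c ++ [PySem.Str.strip line]) := by
        rw [renderJ_snoc_word, hinv]
        by_cases hc : c = [] <;> simp [hc]
      simpa [hne] using ih _ P (c ++ [PySem.Str.strip line]) hacc

-- ===== VERDICT (by name: the statement is the Claim_ definition above) =====
theorem join_lines_markdown_like_spec : Claim_equal_join_lines_markdown_like := by
  intro lines _
  unfold Spec_join_lines_markdown_like join_lines_markdown_like join_lines_markdown_like_alt
  have h := main_invariant lines "" [] [] (by simp [renderJ])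
  simp only [renderJ] at h
  simpa using h
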